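-- pv_equiv track=rewrite | github.com/CristobalZurita/CDS | scripts/sync_instruments.py | resolve_variant_base
-- ===== SOURCE A (Python) =====
-- from typing import Dict, List, Set, Tuple
--
-- VARIANT_SUFFIXES = (
--     "BACK2",
--     "FRONT2",
--     "BACK",
--     "FRONT",
--     "LATERAL",
--     "LADO",
--     "LADOS",
--     "SIDE",
--     "LEFT",
--     "RIGHT",
--     "TOP",
--     "BOTTOM",
--     "DETAIL",
--     "CLOSEUP",
-- )
--
-- def resolve_variant_base(name: str, all_names_set: Set[str]) -> Tuple[str, str]:
--     """
--     Si name es variante de una base existente, retorna (base, suffix).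
--     Si no, retorna (name, "").
--     """
--     for suffix in sorted(VARIANT_SUFFIXES, key=len, reverse=True):
--         token = f"_{suffix}"
--         if name.endswith(token):
--             base_name = name[: -len(token)]
--             if base_name in all_names_set:
--                 return base_name, suffix
--     return name, ""
-- ===== SOURCE B (Python) =====
-- VARIANT_SUFFIXES = (
--     "BACK2",
--     "FRONT2",
--     "BACK",
--     "FRONT",
--     "LATERAL",
--     "LADO",
--     "LADOS",
--     "SIDE",
--     "LEFT",
--     "RIGHT",
--     "TOP",
--     "BOTTOM",
--     "DETAIL",
--     "CLOSEUP",
-- )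
--
-- _VARIANT_SUFFIX_SET = set(VARIANT_SUFFIXES)
--
-- def resolve_variant_base(name, all_names_set):
--     base, sep, tail = name.rpartition('_')
--     if sep and tail in _VARIANT_SUFFIX_SET and base in all_names_set:
--         return base, tail
--     return name, ''
-- ===== Notes on version B (the rewrite author's own statement) =====
-- stated objective: simpler
-- what changed: Replaces the length-sorted scan over all 14 variant suffixes (each with endswith and slicing) by a single rpartition('_') followed by one set-membership test on the tail; this is exact because no suffix contains an underscore, so at most one suffix can ever match.
import Mathlib
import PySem

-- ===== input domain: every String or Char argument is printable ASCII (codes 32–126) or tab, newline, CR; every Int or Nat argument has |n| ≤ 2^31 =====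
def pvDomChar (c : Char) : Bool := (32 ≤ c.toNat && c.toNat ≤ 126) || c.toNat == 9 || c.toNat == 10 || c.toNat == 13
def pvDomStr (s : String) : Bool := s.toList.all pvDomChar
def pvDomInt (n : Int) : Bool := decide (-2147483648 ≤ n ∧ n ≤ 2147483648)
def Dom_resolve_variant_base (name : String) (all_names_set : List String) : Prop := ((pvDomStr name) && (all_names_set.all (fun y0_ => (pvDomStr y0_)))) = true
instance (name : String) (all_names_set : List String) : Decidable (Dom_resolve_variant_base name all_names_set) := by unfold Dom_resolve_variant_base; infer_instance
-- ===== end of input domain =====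

-- B replaces A's length-sorted scan over all 14 variant suffixes by a single rpartition('_')
-- plus one set-membership test on the tail (exact because no suffix contains '_'); objective: simpler.


-- ===== PORT A =====
def variantSuffixes : List String :=
  ["BACK2", "FRONT2", "BACK", "FRONT", "LATERAL", "LADO", "LADOS", "SIDE",
   "LEFT", "RIGHT", "TOP", "BOTTOM", "DETAIL", "CLOSEUP"]

-- the 'for suffix in sorted(...)' loop, one equation per iteration
def resolveLoop (name : String) (all_names_set : List String) : List String → String × String
  | [] => (name, "")
  | suffix :: rest =>
    let token : List Char := '_' :: suffix.toList          -- f"_{suffix}"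
    if PySem.Chars.endswith name.toList token then
      let base_name : String := String.ofList (PySem.List.slice name.toList none (some (-(token.length : Int))))  -- name[: -len(token)]
      if all_names_set.contains base_name then (base_name, suffix)
      else resolveLoop name all_names_set rest
    else resolveLoop name all_names_set rest

def resolve_variant_base (name : String) (all_names_set : List String) : String × String :=
  resolveLoop name all_names_set (PySem.List.sorted variantSuffixes (fun s => PySem.Str.len s) true)

-- ===== PORT B =====
def variantSuffixSet : List String := PySem.Set.ofList variantSuffixes   -- set(VARIANT_SUFFIXES)

-- Source B's name.rpartition('_') is ported by hand (PySem has no rpartition): on the reversed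
-- character list, takeWhile (· != '_') is exactly the text after the LAST underscore; exact
-- for this single-character separator.
def resolve_variant_base_alt (name : String) (all_names_set : List String) : String × String :=
  let r := name.toList.reverse
  let tailRev := r.takeWhile (fun c => c != '_')
  if tailRev.length = r.length then (name, "")             -- no '_' in name: sep = ''
  else
    let base := String.ofList ((r.drop (tailRev.length + 1)).reverse)
    let tail := String.ofList tailRev.reverse
    if variantSuffixSet.contains tail && all_names_set.contains base then (base, tail)
    else (name, "")

-- ===== PRECONDITION & SPEC =====
def Spec_resolve_variant_base (name : String) (all_names_set : List String) (out : String × String) : Prop := out = resolve_variant_base_alt name all_names_set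
instance (name : String) (all_names_set : List String) (out : String × String) : Decidable (Spec_resolve_variant_base name all_names_set out) := by unfold Spec_resolve_variant_base; infer_instance

-- ===== CLAIM (what is proved, stated in full; the proofs are below) =====
def Claim_equal_resolve_variant_base : Prop := ∀ (name : String) (all_names_set : List String), Dom_resolve_variant_base name all_names_set → Spec_resolve_variant_base name all_names_set (resolve_variant_base name all_names_set)

-- ===== LEMMAS AND PROOFS =====

-- takeWhile (· != '_') on u ++ '_' :: rest with '_'-free u is u
theorem takeWhile_free (u rest : List Char) (h : ∀ c ∈ u, c ≠ '_') :
    (u ++ '_' :: rest).takeWhile (fun c => c != '_') = u := by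
  induction u with
  | nil => simp
  | cons a u ih =>
    have ha : a ≠ '_' := h a (by simp)
    simp only [List.cons_append, List.takeWhile_cons]
    simp [ha, ih (fun c hc => h c (by simp [hc]))]

-- name.endswith('_' + sl) for '_'-free sl, characterised through the reversed list
theorem endswith_char (cs sl : List Char) (hfree : '_' ∉ sl) :
    PySem.Chars.endswith cs ('_' :: sl) = true ↔
      (cs.reverse.takeWhile (fun c => c != '_') = sl.reverse ∧ sl.length < cs.length) := by
  rw [PySem.Chars.endswith_iff]
  constructor
  · rintro ⟨pre, hpre⟩
    have hr : cs.reverse = sl.reverse ++ '_' :: pre.reverse := by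
      rw [← hpre]; simp
    have hfree' : ∀ c ∈ sl.reverse, c ≠ '_' := by
      intro c hc hcu; exact hfree (by simpa [hcu] using List.mem_reverse.mp hc)
    refine ⟨by rw [hr, takeWhile_free _ _ hfree'], ?_⟩
    have : cs.reverse.length = sl.reverse.length + (pre.reverse.length + 1) := by
      rw [hr]; simp
    simp at this; omega
  · rintro ⟨ht, hlen⟩
    have hsplit := List.takeWhile_append_dropWhile (p := fun c => c != '_') (l := cs.reverse)
    have hd : cs.reverse.dropWhile (fun c => c != '_') ≠ [] := by
      intro h0
      rw [h0, List.append_nil, ht] at hsplit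
      have : cs.reverse.length = sl.length := by rw [← hsplit]; simp
      simp at this; omega
    obtain ⟨d, tl, hdt⟩ := List.exists_cons_of_ne_nil hd
    have hd' : d = '_' := by
      have := List.head_dropWhile_not (p := fun c => c != '_') (l := cs.reverse) hd
      simp [hdt] at this
      exact this
    have hr : cs.reverse = sl.reverse ++ '_' :: tl := by
      conv_lhs => rw [← hsplit]
      rw [ht, hdt, hd']
    rw [← List.reverse_prefix]
    exact ⟨tl, by simpa using hr.symm⟩

-- name[: -(len(sl)+1)] through the reversed list
theorem slice_base (cs sl : List Char) :
    PySem.List.slice cs none (some (-((sl.length + 1 : Nat) : Int))) =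
      (cs.reverse.drop (sl.length + 1)).reverse := by
  rw [PySem.List.slice_to_neg_natCast cs (sl.length + 1) (by omega), List.drop_reverse,
    List.reverse_reverse]

-- the loop over any '_'-free suffix list, in closed form
theorem loop_eq (name : String) (st : List String) (L : List String)
    (hfree : ∀ s ∈ L, '_' ∉ s.toList) :
    resolveLoop name st L =
      (if (name.toList.reverse.takeWhile (fun c => c != '_')).length < name.toList.length
          ∧ String.ofList (name.toList.reverse.takeWhile (fun c => c != '_')).reverse ∈ L
          ∧ st.contains (String.ofList ((name.toList.reverse.drop
              ((name.toList.reverse.takeWhile (fun c => c != '_')).length + 1)).reverse)) = true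
       then (String.ofList ((name.toList.reverse.drop
              ((name.toList.reverse.takeWhile (fun c => c != '_')).length + 1)).reverse),
             String.ofList (name.toList.reverse.takeWhile (fun c => c != '_')).reverse)
       else (name, "")) := by
  induction L with
  | nil => simp [resolveLoop]
  | cons suffix rest ih =>
    have ihr := ih (fun s hs => hfree s (by simp [hs]))
    by_cases he : PySem.Chars.endswith name.toList ('_' :: suffix.toList) = true
    · obtain ⟨ht, hlen⟩ := (endswith_char name.toList suffix.toList
        (hfree suffix (by simp))).mp he
      have htlen : (name.toList.reverse.takeWhile (fun c => c != '_')).length =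
            suffix.toList.length := by rw [ht]; simp
      have hsuf : String.ofList (name.toList.reverse.takeWhile (fun c => c != '_')).reverse
          = suffix := by rw [ht]; simp
      have hbase : String.ofList (PySem.List.slice name.toList none
            (some (-((('_' :: suffix.toList).length : Nat) : Int)))) =
          String.ofList ((name.toList.reverse.drop
            ((name.toList.reverse.takeWhile (fun c => c != '_')).length + 1)).reverse) := by
        rw [htlen]
        congr 1
        simpa using slice_base name.toList suffix.toList
      simp only [resolveLoop, he, if_true, hbase]
      by_cases hc : st.contains (String.ofList ((name.toList.reverse.drop
          ((name.toList.reverse.takeWhile (fun c => c != '_')).length + 1)).reverse)) = true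
      · rw [if_pos hc, if_pos ⟨by omega, by rw [hsuf]; simp, hc⟩, hsuf]
      · rw [if_neg hc, ihr, if_neg (by rintro ⟨_, _, h⟩; exact hc h),
            if_neg (by rintro ⟨_, _, h⟩; exact hc h)]
    · have hne := (not_iff_not.mpr (endswith_char name.toList suffix.toList
        (hfree suffix (by simp)))).mp he
      simp only [resolveLoop, he, if_false, Bool.false_eq_true, ihr]
      by_cases hlen : (name.toList.reverse.takeWhile (fun c => c != '_')).length <
          name.toList.length
      · have hnsuf : String.ofList (name.toList.reverse.takeWhile (fun c => c != '_')).reverse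
            ≠ suffix := by
          intro heq
          apply hne
          have h1 : (name.toList.reverse.takeWhile (fun c => c != '_')).reverse
              = suffix.toList := by rw [← heq]; simp
          have h2 : name.toList.reverse.takeWhile (fun c => c != '_')
              = suffix.toList.reverse := by rw [← h1]; simp
          refine ⟨h2, ?_⟩
          rw [h2, List.length_reverse] at hlen
          exact hlen
        congr 1
        simp [hnsuf]
      · rw [if_neg (by rintro ⟨h, _, _⟩; exact hlen h),
          if_neg (by rintro ⟨h, _, _⟩; exact hlen h)]

theorem hfree_sorted : ∀ s ∈ PySem.List.sorted variantSuffixes (fun s => PySem.Str.len s) true,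
    '_' ∉ s.toList := by
  intro s hs
  rw [PySem.List.mem_sorted] at hs
  fin_cases hs <;> decide

theorem main_eq (name : String) (st : List String) :
    resolve_variant_base name st = resolve_variant_base_alt name st := by
  rw [resolve_variant_base, loop_eq name st _ hfree_sorted]
  show _ = resolve_variant_base_alt name st
  rw [resolve_variant_base_alt]
  have hle : (name.toList.reverse.takeWhile (fun c => c != '_')).length ≤
      name.toList.reverse.length :=
    (List.takeWhile_prefix (p := fun c => c != '_') (l := name.toList.reverse)).length_le
  have hmem : String.ofList (name.toList.reverse.takeWhile (fun c => c != '_')).reverse ∈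
        PySem.List.sorted variantSuffixes (fun s => PySem.Str.len s) true ↔
      variantSuffixSet.contains
        (String.ofList (name.toList.reverse.takeWhile (fun c => c != '_')).reverse) = true := by
    rw [PySem.List.mem_sorted, List.contains_iff_mem, variantSuffixSet,
      PySem.Set.mem_ofList]
  by_cases hlen : (name.toList.reverse.takeWhile (fun c => c != '_')).length =
      name.toList.reverse.length
  · rw [if_pos hlen, if_neg (by rintro ⟨h, _, _⟩; simp at hlen h; omega)]
  · rw [if_neg hlen]
    have hlen' : (name.toList.reverse.takeWhile (fun c => c != '_')).length <
        name.toList.length := by simp at hle hlen ⊢; omega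
    by_cases hm : variantSuffixSet.contains
        (String.ofList (name.toList.reverse.takeWhile (fun c => c != '_')).reverse) = true
    · by_cases hc : st.contains (String.ofList ((name.toList.reverse.drop
          ((name.toList.reverse.takeWhile (fun c => c != '_')).length + 1)).reverse)) = true
      · rw [if_pos ⟨hlen', hmem.mpr hm, hc⟩, if_pos (by rw [hm, hc]; rfl)]
      · rw [if_neg (by rintro ⟨_, _, h⟩; exact hc h),
          if_neg (by rw [Bool.and_eq_true]; rintro ⟨_, h⟩; exact hc h)]
    · rw [if_neg (by rintro ⟨_, h, _⟩; exact hm (hmem.mp h)),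
        if_neg (by rw [Bool.and_eq_true]; rintro ⟨h, _⟩; exact hm h)]

-- ===== VERDICT (by name: the statement is the Claim_ definition above) =====
theorem resolve_variant_base_spec : Claim_equal_resolve_variant_base := by
  unfold Claim_equal_resolve_variant_base Spec_resolve_variant_base
  intro name st _
  exact main_eq name st
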